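-- pv_equiv track=rewrite | github.com/JoepBom/AdventOfCode | 2024/24.py | number_to_signals
-- ===== SOURCE A (Python) =====
-- def int_to_bin_list(A_int):
--     A_bin = list()
--     count = 1
--     while True:
--         if A_int == 0:
--             break
--         if A_int%(2*count) == 0:
--             A_bin.append(0)
--         else:
--             A_bin.append(1)
--             A_int -= count
--         count *= 2
--     return A_bin
--
-- def number_to_signals(prefix: str, number: int, min_length: int):
--     bin_list = int_to_bin_list(number)
--     while len(bin_list) < min_length:
--         bin_list.append(0)
--     signals = dict()
--     for i, bit in enumerate(bin_list):
--         signals[prefix+("0"+ str(i) if i<= 9 else str(i))] = bool(bit)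
--     return signals
-- ===== SOURCE B (Python) =====
-- def number_to_signals(prefix: str, number: int, min_length: int):
--     length = max(number.bit_length(), min_length)
--     signals = dict()
--     for i in range(length):
--         suffix = "0" + str(i) if i <= 9 else str(i)
--         signals[prefix + suffix] = bool((number >> i) & 1)
--     return signals
-- ===== Notes on version B (the rewrite author's own statement) =====
-- stated objective: simpler
-- what changed: Replaces A's helper's repeated remainder-test-and-subtraction loop plus a separate zero-padding while-loop with a single shift-and-mask pass over the precomputed length max(number.bit_length(), min_length).
import Mathlib
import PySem

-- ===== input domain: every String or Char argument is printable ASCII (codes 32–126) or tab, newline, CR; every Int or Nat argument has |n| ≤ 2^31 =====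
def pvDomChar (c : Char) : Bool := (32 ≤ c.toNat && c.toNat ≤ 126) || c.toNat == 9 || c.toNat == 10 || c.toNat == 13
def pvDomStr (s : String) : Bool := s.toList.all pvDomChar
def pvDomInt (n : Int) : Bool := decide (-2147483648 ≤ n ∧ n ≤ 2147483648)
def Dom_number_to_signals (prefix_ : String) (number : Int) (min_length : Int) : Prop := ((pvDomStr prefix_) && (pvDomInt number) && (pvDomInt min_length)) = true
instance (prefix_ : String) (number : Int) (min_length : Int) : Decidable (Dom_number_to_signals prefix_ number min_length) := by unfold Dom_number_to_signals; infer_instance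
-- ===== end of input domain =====

-- B replaces A's remainder-and-subtraction bit-extraction loop plus separate zero-padding loop
-- by one shift-and-mask pass over the precomputed length max(bit_length, min_length): simpler.

-- ===== PORT A =====
-- The Python 'while True' loop of int_to_bin_list, with fuel bounding the iteration count
-- (for a ≥ 0 the loop runs bit_length(a) ≤ a times, so fuel a.toNat+1 suffices and the port is
-- exact; for a < 0 the Python loop never terminates — excluded by Pre_ below).
def intToBinListLoop (a count : Int) (fuel : Nat) : List Int :=
  match fuel with
  | 0 => []
  | f + 1 =>
    if a = 0 then []
    else if PySem.Int.mod a (2 * count) = 0 then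
      0 :: intToBinListLoop a (2 * count) f
    else
      1 :: intToBinListLoop (a - count) (2 * count) f

def int_to_bin_list (aInt : Int) : List Int :=
  intToBinListLoop aInt 1 (aInt.toNat + 1)

-- the 'while len(bin_list) < min_length: bin_list.append(0)' loop
def padZeros (l : List Int) (min_length : Int) : List Int :=
  if h : (l.length : Int) < min_length then padZeros (l ++ [0]) min_length else l
termination_by (min_length - l.length).toNat
decreasing_by simp; omega

def number_to_signals (prefix_ : String) (number : Int) (min_length : Int) : List (String × Bool) :=
  let bin_list := padZeros (int_to_bin_list number) min_length
  ((PySem.List.enumerate bin_list 0).foldl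
    (fun (d : PySem.Dict String Bool) p =>
      d.insert (prefix_ ++ (if p.1 ≤ 9 then "0" ++ PySem.Int.toStr p.1 else PySem.Int.toStr p.1))
        (p.2 != 0))
    PySem.Dict.empty).items

-- ===== PORT B =====
-- 'bool((number >> i) & 1)' is 'PySem.Int.band (number >>> i.toNat) 1 != 0' (exact; i ≥ 0 in range)
def number_to_signals_alt (prefix_ : String) (number : Int) (min_length : Int) : List (String × Bool) :=
  let length : Int := max (PySem.Int.bitLength number : Int) min_length
  ((PySem.List.pyRange 0 length 1).foldl
    (fun (d : PySem.Dict String Bool) i =>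
      d.insert (prefix_ ++ (if i ≤ 9 then "0" ++ PySem.Int.toStr i else PySem.Int.toStr i))
        (PySem.Int.band (number >>> i.toNat) 1 != 0))
    PySem.Dict.empty).items

-- ===== PRECONDITION & SPEC =====
-- Pre_ excludes negative number, on which A's bit-extraction loop never terminates (no return).
def Pre_number_to_signals (prefix_ : String) (number : Int) (min_length : Int) : Prop := 0 ≤ number
instance (prefix_ : String) (number : Int) (min_length : Int) : Decidable (Pre_number_to_signals prefix_ number min_length) := by unfold Pre_number_to_signals; infer_instance
def pvWitness_number_to_signals : String × Int × Int := ("z", 5, 3)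

def Spec_number_to_signals (prefix_ : String) (number : Int) (min_length : Int) (out : List (String × Bool)) : Prop := out = number_to_signals_alt prefix_ number min_length
instance (prefix_ : String) (number : Int) (min_length : Int) (out : List (String × Bool)) : Decidable (Spec_number_to_signals prefix_ number min_length out) := by unfold Spec_number_to_signals; infer_instance

-- ===== CLAIM (what is proved, stated in full; the proofs are below) =====
def Claim_equal_number_to_signals : Prop := ∀ (prefix_ : String) (number : Int) (min_length : Int), Dom_number_to_signals prefix_ number min_length → Pre_number_to_signals prefix_ number min_length → Spec_number_to_signals prefix_ number min_length (number_to_signals prefix_ number min_length)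

-- ===== LEMMAS AND PROOFS =====

-- LSB-first binary digits of a Nat: proof-side characterisation of A's loop
def bitsNat : Nat → List Int
  | 0 => []
  | (n + 1) => (((n + 1) % 2 : Nat) : Int) :: bitsNat ((n + 1) / 2)

lemma intToBinListLoop_eq (m : Nat) : ∀ (k fuel : Nat), m < fuel →
    intToBinListLoop ((2 ^ k * m : Nat) : Int) ((2 ^ k : Nat) : Int) fuel = bitsNat m := by
  induction m using Nat.strong_induction_on with
  | _ m ih =>
    intro k fuel hf
    match fuel, hf with
    | f + 1, hf =>
      match m, hf with
      | 0, _ => simp [intToBinListLoop, bitsNat]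
      | n + 1, hf =>
        have hm : 0 < n + 1 := Nat.succ_pos n
        have hane : ((2 ^ k * (n + 1) : Nat) : Int) ≠ 0 := by
          have : 0 < 2 ^ k * (n + 1) := Nat.mul_pos (Nat.pow_pos (by norm_num : 0 < 2)) hm
          exact_mod_cast Nat.pos_iff_ne_zero.mp this
        have hcount : (2 : Int) * ((2 ^ k : Nat) : Int) = ((2 ^ (k + 1) : Nat) : Int) := by
          push_cast; ring
        have hdvd : PySem.Int.mod ((2 ^ k * (n + 1) : Nat) : Int) (2 * ((2 ^ k : Nat) : Int)) = 0
            ↔ 2 ∣ (n + 1) := by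
          rw [hcount, PySem.Int.mod_eq_zero_iff_dvd, Int.natCast_dvd_natCast,
            pow_succ, Nat.mul_dvd_mul_iff_left (Nat.pow_pos (by norm_num : 0 < 2))]
        have hle : n + 1 ≤ f := Nat.lt_succ_iff.mp hf
        have hhalf : (n + 1) / 2 < f := lt_of_lt_of_le (Nat.div_lt_self hm (by norm_num)) hle
        rw [intToBinListLoop, if_neg hane]
        by_cases he : 2 ∣ (n + 1)
        · rw [if_pos (hdvd.mpr he)]
          have harg : ((2 ^ k * (n + 1) : Nat) : Int) = ((2 ^ (k + 1) * ((n + 1) / 2) : Nat) : Int) := by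
            congr 1
            obtain ⟨t, ht⟩ := he
            have hd2 : (n + 1) / 2 = t := by omega
            rw [hd2, ht, pow_succ]; ring
          rw [harg, hcount, ih ((n + 1) / 2) (Nat.div_lt_self hm (by norm_num)) (k + 1) f hhalf]
          have hz : (n + 1) % 2 = 0 := Nat.dvd_iff_mod_eq_zero.mp he
          rw [bitsNat, hz]
          norm_num
        · rw [if_neg (fun h => he (hdvd.mp h))]
          have hodd : (n + 1) % 2 = 1 := by
            rcases Nat.mod_two_eq_zero_or_one (n + 1) with h | h
            · exact absurd (Nat.dvd_iff_mod_eq_zero.mpr h) he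
            · exact h
          have harg : ((2 ^ k * (n + 1) : Nat) : Int) - ((2 ^ k : Nat) : Int)
              = ((2 ^ (k + 1) * ((n + 1) / 2) : Nat) : Int) := by
            have h1 : 2 ^ (k + 1) * ((n + 1) / 2) = 2 ^ k * (n + 1) - 2 ^ k := by
              have h2 : 2 * ((n + 1) / 2) = n := by omega
              rw [pow_succ]
              calc 2 ^ k * 2 * ((n + 1) / 2) = 2 ^ k * (2 * ((n + 1) / 2)) := by ring
                _ = 2 ^ k * n := by rw [h2]
                _ = 2 ^ k * (n + 1) - 2 ^ k := by rw [Nat.mul_add]; omega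
            rw [h1]
            have hle2 : 2 ^ k ≤ 2 ^ k * (n + 1) := Nat.le_mul_of_pos_right _ hm
            push_cast [Nat.cast_sub hle2]
            ring
          rw [harg, hcount, ih ((n + 1) / 2) (Nat.div_lt_self hm (by norm_num)) (k + 1) f hhalf]
          rw [bitsNat, hodd]
          norm_num

lemma int_to_bin_list_eq (n : Int) (hn : 0 ≤ n) : int_to_bin_list n = bitsNat n.toNat := by
  have := intToBinListLoop_eq n.toNat 0 (n.toNat + 1) (Nat.lt_succ_self _)
  simpa [int_to_bin_list, Int.toNat_of_nonneg hn] using this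

lemma length_bitsNat (m : Nat) : (bitsNat m).length = PySem.Int.bitLength (m : Int) := by
  induction m using Nat.strong_induction_on with
  | _ m ih =>
    match m with
    | 0 => simp [bitsNat, PySem.Int.bitLength_zero]
    | n + 1 =>
      rw [bitsNat, List.length_cons,
        ih ((n + 1) / 2) (Nat.div_lt_self (Nat.succ_pos n) (by norm_num)),
        PySem.Int.bitLength_natCast (Nat.succ_pos n)]

lemma getElem_bitsNat (m : Nat) : ∀ (j : Nat) (h : j < (bitsNat m).length),
    (bitsNat m)[j] = (((m >>> j) % 2 : Nat) : Int) := by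
  induction m using Nat.strong_induction_on with
  | _ m ih =>
    match m with
    | 0 => intro j h; simp [bitsNat] at h
    | n + 1 =>
      intro j h
      match j with
      | 0 => simp [bitsNat]
      | j + 1 =>
        have h' : j < (bitsNat ((n + 1) / 2)).length := by
          rw [bitsNat] at h; simpa using h
        have hstep : (bitsNat (n + 1))[j + 1]'h = (bitsNat ((n + 1) / 2))[j]'h' := by
          simp [bitsNat]
        rw [hstep, ih ((n + 1) / 2) (Nat.div_lt_self (Nat.succ_pos n) (by norm_num)) j h']
        congr 1
        rw [Nat.shiftRight_eq_div_pow, Nat.shiftRight_eq_div_pow, Nat.div_div_eq_div_mul]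
        congr 1
        rw [pow_succ, Nat.mul_comm 2 (2 ^ j)]

lemma padZeros_eq (l : List Int) (ml : Int) :
    padZeros l ml = l ++ List.replicate ((ml - l.length).toNat) 0 := by
  fun_induction padZeros l ml with
  | case1 l h ih =>
    have hk : ((ml - l.length).toNat) = ((ml - ((l ++ [0]).length : Int)).toNat) + 1 := by
      simp; omega
    rw [ih, hk, List.replicate_succ]
    simp
  | case2 l h =>
    have hk : (ml - l.length).toNat = 0 := by omega
    simp [hk]

lemma bits_high_zero (m j : Nat) (h : PySem.Int.bitLength (m : Int) ≤ j) : (m >>> j) % 2 = 0 := by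
  have h1 : m < 2 ^ PySem.Int.bitLength (m : Int) := by
    simpa using PySem.Int.lt_two_pow_bitLength (m : Int)
  have h2 : m < 2 ^ j := lt_of_lt_of_le h1 (Nat.pow_le_pow_right (by norm_num) h)
  rw [Nat.shiftRight_eq_div_pow, Nat.div_eq_of_lt h2]

-- the padded list is exactly the list of low bits up to max(bit_length, min_length)
lemma padded_eq (m : Nat) (ml : Int) :
    padZeros (bitsNat m) ml
      = (List.range (max (PySem.Int.bitLength (m : Int)) ml.toNat)).map
          (fun j => (((m >>> j) % 2 : Nat) : Int)) := by
  rw [padZeros_eq]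
  apply List.ext_getElem
  · simp [length_bitsNat]; omega
  · intro j h1 h2
    rw [List.getElem_map, List.getElem_range]
    by_cases hj : j < (bitsNat m).length
    · rw [List.getElem_append_left hj, getElem_bitsNat m j hj]
    · rw [List.getElem_append_right (le_of_not_gt hj), List.getElem_replicate]
      rw [bits_high_zero m j (by rw [← length_bitsNat]; omega)]
      simp

-- ===== VERDICT (by name: the statement is the Claim_ definition above) =====
theorem number_to_signals_spec : Claim_equal_number_to_signals := by
  intro p n ml _ hpre
  unfold Spec_number_to_signals
  obtain ⟨m, rfl⟩ : ∃ m : Nat, n = (m : Int) := ⟨n.toNat, (Int.toNat_of_nonneg hpre).symm⟩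
  simp only [number_to_signals, number_to_signals_alt]
  have hbin : int_to_bin_list (m : Int) = bitsNat m := by
    simpa using int_to_bin_list_eq (m : Int) (Int.natCast_nonneg m)
  rw [hbin, padded_eq]
  set B := PySem.Int.bitLength ((m : Int)) with hB
  set N := max B ml.toNat with hN
  have hL : max ((B : Int)) ml = (N : Int) := by omega
  rw [hL]
  rw [PySem.List.enumerate_eq_map_pyRange _ (0 : Int), List.foldl_map]
  have hlen : PySem.List.len ((List.range N).map (fun j => (((m >>> j) % 2 : Nat) : Int))) = (N : Int) := by
    simp [PySem.List.len_eq]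
  rw [hlen]
  congr 1
  apply PySem.List.foldl_congr_mem
  intro d j hj
  obtain ⟨hj0, hjN⟩ := PySem.List.mem_pyRange_one.mp hj
  have hjN' : j.toNat < N := by omega
  dsimp only
  have hget : PySem.List.pyGetD ((List.range N).map (fun j => (((m >>> j) % 2 : Nat) : Int))) j 0
      = (((m >>> j.toNat) % 2 : Nat) : Int) := by
    rw [PySem.List.pyGetD_of_nonneg _ _ hj0, PySem.List.getD_map_range _ _ _ _ hjN']
  rw [hget]
  have hval : PySem.Int.band ((m : Int) >>> j.toNat) 1 = (((m >>> j.toNat) % 2 : Nat) : Int) := by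
    have hsh : ((m : Int) >>> j.toNat) = ((m >>> j.toNat : Nat) : Int) := by simp
    rw [hsh, PySem.Int.band_one, PySem.Int.mod_eq_emod_of_pos (by norm_num)]
    push_cast
    rfl
  rw [hval]
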